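-- pv_equiv track=rewrite | github.com/bonom/Quantum-Annealing-for-solving-QUBO-Problems | QA4QUBO/matrix.py | generate_QUBO_problem
-- ===== SOURCE A (Python) =====
-- def generate_QUBO_problem(S):
--     """
--         Generate a QUBO problem (The number partitioning problem) from a vector S
--     """
--     n = len(S)
--     c = 0
--     for i in range(n):
--         c += S[i]
--     col_max = 0
--     col = 0
--     QUBO = [[0 for col in range(n)] for row in range(n)]
--     for row in range(n):
--         col_max += 1
--         while col < col_max:
--             if row == col:
--                 QUBO[row][col] = S[row]*(S[row]-c)
--             else:
--                 QUBO[row][col] = S[row] * S[col]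
--                 QUBO[col][row] = QUBO[row][col]
--             col += 1
--         col = 0
--     return QUBO, c
-- ===== SOURCE B (Python) =====
-- def generate_QUBO_problem(S):
--     """
--         Generate a QUBO problem (The number partitioning problem) from a vector S
--     """
--     n = len(S)
--     c = sum(S)
--     QUBO = [[S[i] * (S[i] - c) if i == j else S[i] * S[j] for j in range(n)]
--             for i in range(n)]
--     return QUBO, c
-- ===== Notes on version B (the rewrite author's own statement) =====
-- stated objective: simpler
-- what changed: Replaces the triangular fill-and-mirror loops (a while loop over explicit col/col_max state plus a symmetric back-assignment into a pre-built zero matrix) by a single direct nested comprehension computing every entry from its closed-form value, and the manual accumulation loop for c by sum(S).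
import Mathlib
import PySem

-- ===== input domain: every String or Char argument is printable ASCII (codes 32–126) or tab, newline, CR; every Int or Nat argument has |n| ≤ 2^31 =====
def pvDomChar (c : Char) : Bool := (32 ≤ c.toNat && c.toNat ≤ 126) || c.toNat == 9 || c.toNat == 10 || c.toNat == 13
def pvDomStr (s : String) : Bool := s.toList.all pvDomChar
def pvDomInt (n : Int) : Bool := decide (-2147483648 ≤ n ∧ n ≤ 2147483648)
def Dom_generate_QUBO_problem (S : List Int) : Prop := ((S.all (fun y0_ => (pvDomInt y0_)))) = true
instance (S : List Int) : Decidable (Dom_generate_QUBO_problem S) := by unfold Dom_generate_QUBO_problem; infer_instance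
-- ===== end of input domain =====

-- B replaces A's triangular fill-and-mirror loops by a direct closed-form nested comprehension (simpler); return value equivalence, no mutation involved.

-- ===== PORT A =====
-- QUBO[row][col] = v  (list-of-lists assignment; indices produced by range, always in bounds)
def pvSetAt (m : List (List Int)) (r c : Nat) (v : Int) : List (List Int) :=
  m.set r ((m.getD r []).set c v)

-- QUBO[row][col]  (read-back used by the mirroring assignment)
def pvGet2 (m : List (List Int)) (r c : Nat) : Int := (m.getD r []).getD c 0

def generate_QUBO_problem (S : List Int) : List (List Int) × Int :=
  let n := S.length
  let c := (List.range n).foldl (fun acc i => acc + S.getD i 0) 0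
  let QUBO0 := (List.range n).map (fun _row => (List.range n).map (fun _col => (0 : Int)))
  let QUBO := (List.range n).foldl (fun m row =>
      -- col_max = row+1; while col < col_max  ⇒  fold over cols 0,…,row
      (List.range (row + 1)).foldl (fun m col =>
        if row = col then pvSetAt m row col (S.getD row 0 * (S.getD row 0 - c))
        else
          let m1 := pvSetAt m row col (S.getD row 0 * S.getD col 0)
          pvSetAt m1 col row (pvGet2 m1 row col)) m) QUBO0
  (QUBO, c)

-- ===== PORT B =====
def generate_QUBO_problem_alt (S : List Int) : List (List Int) × Int :=
  let n := S.length
  let c := S.sum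
  ((List.range n).map (fun i => (List.range n).map (fun j =>
      if i = j then S.getD i 0 * (S.getD i 0 - c) else S.getD i 0 * S.getD j 0)), c)

-- ===== PRECONDITION & SPEC =====
def Spec_generate_QUBO_problem (S : List Int) (out : List (List Int) × Int) : Prop := out = generate_QUBO_problem_alt S
instance (S : List Int) (out : List (List Int) × Int) : Decidable (Spec_generate_QUBO_problem S out) := by unfold Spec_generate_QUBO_problem; infer_instance

-- ===== CLAIM (what is proved, stated in full; the proofs are below) =====
def Claim_equal_generate_QUBO_problem : Prop := ∀ (S : List Int), Dom_generate_QUBO_problem S → Spec_generate_QUBO_problem S (generate_QUBO_problem S)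

-- ===== LEMMAS AND PROOFS =====

-- canonical matrix form: (range n).map of a generating function
def pvMat (n : Nat) (g : Nat → Nat → Int) : List (List Int) :=
  (List.range n).map (fun i => (List.range n).map (g i))

-- the closed-form entry
def pvTgt (S : List Int) (c : Int) (i j : Nat) : Int :=
  if i = j then S.getD i 0 * (S.getD i 0 - c) else S.getD i 0 * S.getD j 0

lemma pvSet_map_range {α : Type} (n : Nat) (h : Nat → α) (c : Nat) (v : α) :
    ((List.range n).map h).set c v = (List.range n).map (fun j => if j = c then v else h j) := by
  apply List.ext_getElem
  · simp
  · intro i h1 h2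
    simp [List.getElem_set, eq_comm]

lemma pvSetAt_mat (n : Nat) (g : Nat → Nat → Int) (r c : Nat) (v : Int) (hr : r < n) :
    pvSetAt (pvMat n g) r c v = pvMat n (fun i j => if i = r ∧ j = c then v else g i j) := by
  unfold pvSetAt pvMat
  have hget : ((List.range n).map (fun i => (List.range n).map (g i))).getD r [] =
      (List.range n).map (g r) := by
    rw [List.getD_eq_getElem _ _ (by simpa using hr)]
    simp
  rw [hget, pvSet_map_range, pvSet_map_range]
  apply List.map_congr_left
  intro i hi
  by_cases hir : i = r
  · subst hir
    rw [if_pos rfl]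
    apply List.map_congr_left
    intro j hj
    by_cases hjc : j = c <;> simp [hjc]
  · simp only [if_neg hir]
    apply List.map_congr_left
    intro j hj
    simp [hir]

lemma pvGet2_mat (n : Nat) (g : Nat → Nat → Int) (r c : Nat) (hr : r < n) (hc : c < n) :
    pvGet2 (pvMat n g) r c = g r c := by
  unfold pvGet2 pvMat
  simp [List.getD_eq_getElem?_getD, hr, hc]

lemma pvMat_congr (n : Nat) (g g' : Nat → Nat → Int)
    (h : ∀ i j, i < n → j < n → g i j = g' i j) : pvMat n g = pvMat n g' := by
  unfold pvMat
  apply List.map_congr_left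
  intro i hi
  apply List.map_congr_left
  intro j hj
  exact h i j (List.mem_range.mp hi) (List.mem_range.mp hj)

-- inner loop invariant: after processing cols 0,…,t-1 of row k
lemma pvInner (S : List Int) (c : Int) (n k : Nat) (hk : k < n) :
    ∀ t, t ≤ k + 1 →
    (List.range t).foldl (fun m col =>
        if k = col then pvSetAt m k col (S.getD k 0 * (S.getD k 0 - c))
        else
          let m1 := pvSetAt m k col (S.getD k 0 * S.getD col 0)
          pvSetAt m1 col k (pvGet2 m1 k col))
      (pvMat n (fun i j => if i < k ∧ j < k then pvTgt S c i j else 0))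
    = pvMat n (fun i j =>
        if (i < k ∧ j < k) ∨ (i = k ∧ j < t) ∨ (j = k ∧ i < t) then pvTgt S c i j else 0) := by
  intro t
  induction t with
  | zero =>
      intro _
      simp only [List.range_zero, List.foldl_nil]
      apply pvMat_congr
      intro i j _ _
      congr 1
      simp only [eq_iff_iff]
      omega
  | succ t ih =>
      intro ht
      have ht' : t ≤ k + 1 := by omega
      have htn : t < n := by omega
      rw [List.range_succ, List.foldl_append, List.foldl_cons, List.foldl_nil, ih ht']
      by_cases hkt : k = t
      · subst hkt
        rw [if_pos rfl]
        rw [pvSetAt_mat n _ k k _ hk]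
        apply pvMat_congr
        intro i j hi hj
        by_cases h1 : i = k ∧ j = k
        · obtain ⟨h1i, h1j⟩ := h1
          subst h1i; subst h1j
          rw [if_pos ⟨rfl, rfl⟩, if_pos (by omega)]
          simp [pvTgt]
        · rw [if_neg h1]
          congr 1
          simp only [eq_iff_iff]
          omega
      · rw [if_neg hkt]
        simp only
        rw [pvSetAt_mat n _ k t _ hk]
        rw [pvGet2_mat n _ k t hk htn]
        rw [if_pos ⟨rfl, rfl⟩]
        rw [pvSetAt_mat n _ t k _ htn]
        apply pvMat_congr
        intro i j hi hj
        by_cases h1 : i = t ∧ j = k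
        · obtain ⟨h1i, h1j⟩ := h1
          subst h1i; subst h1j
          rw [if_pos ⟨rfl, rfl⟩, if_pos (by omega)]
          unfold pvTgt
          rw [if_neg (by omega)]
          ring
        · rw [if_neg h1]
          by_cases h2 : i = k ∧ j = t
          · obtain ⟨h2i, h2j⟩ := h2
            subst h2i; subst h2j
            rw [if_pos ⟨rfl, rfl⟩, if_pos (by omega)]
            unfold pvTgt
            rw [if_neg (by omega)]
          · rw [if_neg h2]
            congr 1
            simp only [eq_iff_iff]
            omega

-- outer loop invariant: after processing rows 0,…,k-1
lemma pvOuter (S : List Int) (c : Int) (n : Nat) :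
    ∀ k, k ≤ n →
    (List.range k).foldl (fun m row =>
        (List.range (row + 1)).foldl (fun m col =>
          if row = col then pvSetAt m row col (S.getD row 0 * (S.getD row 0 - c))
          else
            let m1 := pvSetAt m row col (S.getD row 0 * S.getD col 0)
            pvSetAt m1 col row (pvGet2 m1 row col)) m)
      (pvMat n (fun _ _ => 0))
    = pvMat n (fun i j => if i < k ∧ j < k then pvTgt S c i j else 0) := by
  intro k
  induction k with
  | zero =>
      intro _
      simp only [List.range_zero, List.foldl_nil]
      apply pvMat_congr
      intro i j _ _
      rw [if_neg (by omega)]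
  | succ k ih =>
      intro hk
      have hk' : k ≤ n := by omega
      have hkn : k < n := by omega
      rw [List.range_succ, List.foldl_append, List.foldl_cons, List.foldl_nil, ih hk']
      rw [pvInner S c n k hkn (k + 1) le_rfl]
      apply pvMat_congr
      intro i j hi hj
      congr 1
      simp only [eq_iff_iff]
      omega

lemma pvSumEq (S : List Int) :
    (List.range S.length).foldl (fun acc i => acc + S.getD i 0) 0 = S.sum := by
  rw [PySem.List.foldl_add]
  have : (List.range S.length).map (fun i => S.getD i 0) = S := by
    apply List.ext_getElem
    · simp
    · intro i h1 h2
      simp only [List.length_map, List.length_range] at h1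
      simp [List.getD_eq_getElem?_getD, List.getElem?_eq_getElem h1]
  rw [this]
  simp

-- ===== VERDICT (by name: the statement is the Claim_ definition above) =====
theorem generate_QUBO_problem_spec : Claim_equal_generate_QUBO_problem := by
  intro S _
  show generate_QUBO_problem S = generate_QUBO_problem_alt S
  unfold generate_QUBO_problem generate_QUBO_problem_alt
  simp only
  rw [pvSumEq S]
  have h0 : (List.range S.length).map (fun _row => (List.range S.length).map (fun _col => (0 : Int)))
      = pvMat S.length (fun _ _ => 0) := rfl
  rw [h0, pvOuter S S.sum S.length S.length le_rfl]
  have : pvMat S.length (fun i j => if i < S.length ∧ j < S.length then pvTgt S S.sum i j else 0)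
      = pvMat S.length (pvTgt S S.sum) := by
    apply pvMat_congr
    intro i j hi hj
    rw [if_pos ⟨hi, hj⟩]
  rw [this]
  rfl
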